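-- pv_equiv track=rewrite | github.com/hello0U0/codingtest | PROGRAMMERS/KAKAO_외벽점검.py | makeNewWeak
-- ===== SOURCE A (Python) =====
-- def makeNewWeak(n, weak):
--     num_weak = len(weak)
--     weak_dist = [0] * num_weak
--     weak_dist[0] = weak[0] + n - weak[-1]
--     for i in range(1, num_weak):
--         weak_dist[i] = weak[i]-weak[i-1]
--     start = weak[weak_dist.index(max(weak_dist))]
--
--     for i in range(num_weak):
--         weak[i] = weak[i] - start
--         if weak[i] < 0: weak[i] += n
--     weak.sort()
--     return weak
-- ===== SOURCE B (Python) =====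
-- def makeNewWeak(n, weak):
--     best_i = 0
--     best_d = weak[0] + n - weak[-1]
--     for i in range(1, len(weak)):
--         d = weak[i] - weak[i-1]
--         if d > best_d:
--             best_i, best_d = i, d
--     start = weak[best_i]
--     # The shift w -> w - start (+n if w < start) is monotone on each side of start,
--     # so sorting the input once and splitting it at start yields two ascending runs;
--     # a two-pointer merge then produces the sorted result without sorting the mapped list.
--     lo, hi = [], []
--     for w in sorted(weak):
--         if w < start:
--             lo.append(w - start + n)
--         else:
--             hi.append(w - start)
--     out = []
--     i = j = 0
--     while i < len(lo) and j < len(hi):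
--         if lo[i] <= hi[j]:
--             out.append(lo[i]); i += 1
--         else:
--             out.append(hi[j]); j += 1
--     weak[:] = out + lo[i:] + hi[j:]
--     return weak
-- ===== Notes on version B (the rewrite author's own statement) =====
-- stated objective: alternative
-- what changed: B finds the split point with a streaming (index, gap) argmax instead of materialising the gap list and rescanning it with max()/.index(), and replaces A's subtract-test-fix loop followed by sorting the shifted values by a different pipeline: sort the ORIGINAL values once, split them at the pivot into two already-ascending shifted runs, and combine the runs with a two-pointer merge, so the shifted list is never sorted.
import Mathlib
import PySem

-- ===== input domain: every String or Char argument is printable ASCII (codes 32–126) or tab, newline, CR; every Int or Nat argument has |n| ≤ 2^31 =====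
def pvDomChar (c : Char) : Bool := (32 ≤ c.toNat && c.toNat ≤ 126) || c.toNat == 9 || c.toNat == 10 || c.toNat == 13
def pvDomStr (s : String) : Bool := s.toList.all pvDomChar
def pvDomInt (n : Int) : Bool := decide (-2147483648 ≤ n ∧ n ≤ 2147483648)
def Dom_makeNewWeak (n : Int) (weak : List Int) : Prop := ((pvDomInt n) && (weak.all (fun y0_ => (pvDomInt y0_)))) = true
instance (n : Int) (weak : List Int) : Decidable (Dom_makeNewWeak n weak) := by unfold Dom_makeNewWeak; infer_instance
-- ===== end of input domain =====

-- B finds the split point with a streaming (index, gap) argmax instead of a gap list rescanned by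
-- max()/.index(), and never sorts the shifted values: it sorts the ORIGINAL values once, splits them
-- at the pivot into two already-ascending shifted runs, and combines them with a two-pointer merge
-- (objective: alternative, same asymptotic cost).
-- A mutates `weak` in place; B performs the same final mutation via weak[:] = ...; the theorems are about the returned value.

-- ===== PORT A =====
def makeNewWeak (n : Int) (weak : List Int) : List Int :=
  let numWeak : Int := (weak.length : Int)
  let weakDist : List Int := List.replicate weak.length 0
  let weakDist := PySem.List.pySetD weakDist 0
      (PySem.List.pyGetD weak 0 0 + n - PySem.List.pyGetD weak (-1) 0)
  let weakDist := (PySem.List.pyRange 1 numWeak 1).foldl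
      (fun wd i => PySem.List.pySetD wd i
        (PySem.List.pyGetD weak i 0 - PySem.List.pyGetD weak (i-1) 0)) weakDist
  let mx : Int := (PySem.List.max? weakDist (fun x => x)).getD 0   -- max(weak_dist); [] excluded by Pre_
  let idx : Nat := (PySem.List.index? weakDist mx).getD 0
  let start : Int := PySem.List.pyGetD weak (idx : Int) 0
  let weak2 := (PySem.List.pyRange 0 numWeak 1).foldl
      (fun w i =>
        let w1 := PySem.List.pySetD w i (PySem.List.pyGetD w i 0 - start)
        if PySem.List.pyGetD w1 i 0 < 0 then
          PySem.List.pySetD w1 i (PySem.List.pyGetD w1 i 0 + n)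
        else w1) weak
  PySem.List.sorted weak2 (fun x => x)

-- ===== PORT B =====
-- the two-pointer `while` merge of Source B (out accumulates; the index pair (i, j) is represented by the
-- remaining suffixes lo[i:], hi[j:], whose heads are exactly lo[i], hi[j])
def pvMergeLoop (out lo hi : List Int) : List Int :=
  match lo, hi with
  | a :: lo', b :: hi' =>
      if a ≤ b then pvMergeLoop (out ++ [a]) lo' (b :: hi')
      else pvMergeLoop (out ++ [b]) (a :: lo') hi'
  | lo, hi => out ++ lo ++ hi
termination_by lo.length + hi.length

def makeNewWeak_alt (n : Int) (weak : List Int) : List Int :=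
  let bestD : Int := PySem.List.pyGetD weak 0 0 + n - PySem.List.pyGetD weak (-1) 0
  let st := (PySem.List.pyRange 1 (weak.length : Int) 1).foldl
      (fun (s : Int × Int) i =>
        let d := PySem.List.pyGetD weak i 0 - PySem.List.pyGetD weak (i-1) 0
        if d > s.2 then (i, d) else s) ((0 : Int), bestD)
  let start : Int := PySem.List.pyGetD weak st.1 0
  let p := (PySem.List.sorted weak (fun x => x)).foldl
      (fun (p : List Int × List Int) w =>
        if w < start then (p.1 ++ [w - start + n], p.2) else (p.1, p.2 ++ [w - start]))
      ([], [])
  pvMergeLoop [] p.1 p.2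

-- ===== PRECONDITION & SPEC =====
-- Pre_ excludes only the empty list, on which A (and B alike) raises IndexError.
def Pre_makeNewWeak (n : Int) (weak : List Int) : Prop := weak ≠ []
instance (n : Int) (weak : List Int) : Decidable (Pre_makeNewWeak n weak) := by unfold Pre_makeNewWeak; infer_instance
def pvWitness_makeNewWeak : Int × List Int := (12, [1, 5, 6, 10])
def Spec_makeNewWeak (n : Int) (weak : List Int) (out : List Int) : Prop := out = makeNewWeak_alt n weak
instance (n : Int) (weak : List Int) (out : List Int) : Decidable (Spec_makeNewWeak n weak out) := by unfold Spec_makeNewWeak; infer_instance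

-- ===== CLAIM (what is proved, stated in full; the proofs are below) =====
def Claim_equal_makeNewWeak : Prop := ∀ (n : Int) (weak : List Int), Dom_makeNewWeak n weak → Pre_makeNewWeak n weak → Spec_makeNewWeak n weak (makeNewWeak n weak)

-- ===== LEMMAS AND PROOFS =====

-- L1: the dist-building fold of port A produces d0 :: gaps ++ padding zeros
theorem pvL1 (weak : List Int) (d0 : Int) (k j : Nat) (hj : j < k) :
    (PySem.List.pyRange 1 (1 + (j:Int)) 1).foldl
      (fun wd i => PySem.List.pySetD wd i
        (PySem.List.pyGetD weak i 0 - PySem.List.pyGetD weak (i-1) 0))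
      (PySem.List.pySetD (List.replicate k (0:Int)) 0 d0)
    = (d0 :: (PySem.List.pyRange 1 (1 + (j:Int)) 1).map
        (fun i => PySem.List.pyGetD weak i 0 - PySem.List.pyGetD weak (i-1) 0))
      ++ List.replicate (k - 1 - j) 0 := by
  induction j with
  | zero =>
      rw [show (1 + ((0:Nat):Int)) = 1 by norm_num, PySem.List.pyRange_one_eq_nil le_rfl]
      rw [PySem.List.pySetD_of_nonneg _ _ (by norm_num)]
      obtain ⟨k', rfl⟩ : ∃ k', k = k' + 1 := ⟨k - 1, by omega⟩
      simp [List.replicate_succ]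
  | succ j ih =>
      have h1 : (1 + ((j+1:Nat)):Int) = (1 + (j:Int)) + 1 := by push_cast; ring
      rw [h1, PySem.List.pyRange_one_succ_right (by omega), List.foldl_append, List.map_append,
        ih (by omega)]
      simp only [List.foldl_cons, List.foldl_nil, List.map_cons, List.map_nil]
      rw [PySem.List.pySetD_of_nonneg _ _ (by omega)]
      have hlen : ((d0 :: (PySem.List.pyRange 1 (1 + (j:Int)) 1).map
          (fun i => PySem.List.pyGetD weak i 0 - PySem.List.pyGetD weak (i-1) 0))).length
          = j + 1 := by
        simp [PySem.List.length_pyRange_one]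
      have hrep : List.replicate (k - 1 - j) (0:Int) = 0 :: List.replicate (k - 1 - (j+1)) 0 := by
        have : k - 1 - j = (k - 1 - (j+1)) + 1 := by omega
        rw [this, List.replicate_succ]
      rw [hrep, List.set_append, hlen]
      have : (1 + (j:Int)).toNat = j + 1 := by omega
      rw [this]
      simp

-- L2: the streaming argmax fold of port B computes (first argmax index, max) of d0 :: gaps
theorem pvL2 (g : Int → Int) (d0 : Int) (j : Nat) :
    0 ≤ ((PySem.List.pyRange 1 (1 + (j:Int)) 1).foldl
      (fun (s : Int × Int) i => if g i > s.2 then (i, g i) else s) ((0:Int), d0)).1 ∧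
    ((PySem.List.pyRange 1 (1 + (j:Int)) 1).foldl
      (fun (s : Int × Int) i => if g i > s.2 then (i, g i) else s) ((0:Int), d0)).2
      = ((PySem.List.pyRange 1 (1 + (j:Int)) 1).map g).foldl max d0 ∧
    PySem.List.index? (d0 :: (PySem.List.pyRange 1 (1 + (j:Int)) 1).map g)
      (((PySem.List.pyRange 1 (1 + (j:Int)) 1).foldl
        (fun (s : Int × Int) i => if g i > s.2 then (i, g i) else s) ((0:Int), d0)).2)
      = some (((PySem.List.pyRange 1 (1 + (j:Int)) 1).foldl
        (fun (s : Int × Int) i => if g i > s.2 then (i, g i) else s) ((0:Int), d0)).1.toNat) := by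
  induction j with
  | zero =>
      refine ⟨le_rfl, ?_, ?_⟩ <;>
        simp [PySem.List.pyRange_one_eq_nil le_rfl]
  | succ j ih =>
      obtain ⟨ih1, ih2, ih3⟩ := ih
      have h1 : (1 + ((j+1:Nat)):Int) = (1 + (j:Int)) + 1 := by push_cast; ring
      simp only [h1, PySem.List.pyRange_one_succ_right (show (1:Int) ≤ 1 + (j:Int) by omega),
        List.foldl_append, List.map_append, List.foldl_cons, List.foldl_nil, List.map_cons,
        List.map_nil] at *
      set r := PySem.List.pyRange 1 (1 + (j:Int)) 1 with hr
      set st := r.foldl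
        (fun (s : Int × Int) i => if g i > s.2 then (i, g i) else s) ((0:Int), d0) with hst
      by_cases hc : g (1 + (j:Int)) > st.2
      · simp only [hc, if_pos]
        refine ⟨by omega, ?_, ?_⟩
        · rw [ih2] at hc
          simp [max_eq_right (le_of_lt hc)]
        · have hnotmem : g (1 + (j:Int)) ∉ d0 :: r.map g := by
            intro hmem
            have hle := PySem.List.le_foldl_max (r.map g) d0
            rcases List.mem_cons.mp hmem with h | h
            · have := hle.1; rw [← ih2] at this; omega
            · have := hle.2 _ h; rw [← ih2] at this; omega
          have hsplit : d0 :: (r.map g ++ [g (1 + (j:Int))])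
              = (d0 :: r.map g) ++ [g (1 + (j:Int))] := by simp
          rw [hsplit, PySem.List.index?_append_singleton_self _ _ hnotmem]
          have hlen : (d0 :: r.map g).length = j + 1 := by
            simp [hr, PySem.List.length_pyRange_one]
          rw [hlen]
          congr 1
          omega
      · simp only [hc, if_neg, not_false_iff]
        refine ⟨ih1, ?_, ?_⟩
        · rw [ih2]
          have : g (1 + (j:Int)) ≤ (r.map g).foldl max d0 := by rw [← ih2]; omega
          simp [max_eq_left this]
        · have hmem : st.2 ∈ d0 :: r.map g :=
            (PySem.List.index?_isSome_iff _ _).mp (by rw [ih3]; rfl)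
          have hsplit : d0 :: (r.map g ++ [g (1 + (j:Int))])
              = (d0 :: r.map g) ++ [g (1 + (j:Int))] := by simp
          rw [hsplit, PySem.List.index?_append_of_mem _ hmem, ih3]

-- L3: port A's in-place subtract/test/fix loop maps f over the list
theorem pvL3 (weak : List Int) (start n : Int) (m : Nat) (hm : m ≤ weak.length) :
    (PySem.List.pyRange 0 (m:Int) 1).foldl
      (fun w i =>
        if PySem.List.pyGetD (PySem.List.pySetD w i (PySem.List.pyGetD w i 0 - start)) i 0 < 0 then
          PySem.List.pySetD (PySem.List.pySetD w i (PySem.List.pyGetD w i 0 - start)) i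
            (PySem.List.pyGetD (PySem.List.pySetD w i (PySem.List.pyGetD w i 0 - start)) i 0 + n)
        else PySem.List.pySetD w i (PySem.List.pyGetD w i 0 - start)) weak
    = (weak.take m).map (fun w => if w - start < 0 then w - start + n else w - start)
      ++ weak.drop m := by
  induction m with
  | zero => simp [PySem.List.pyRange_one_eq_nil le_rfl]
  | succ m ih =>
      have hmlt : m < weak.length := by omega
      have h1 : ((m+1:Nat):Int) = (m:Int) + 1 := by push_cast; ring
      rw [h1, PySem.List.pyRange_one_succ_right (by positivity), List.foldl_append,
        ih (by omega)]
      simp only [List.foldl_cons, List.foldl_nil]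
      set f : Int → Int := fun w => if w - start < 0 then w - start + n else w - start with hf
      set l1 := (weak.take m).map f with hl1
      have hlen1 : l1.length = m := by simp [hl1, hmlt.le]
      have hdrop : weak.drop m = weak[m] :: weak.drop (m+1) := List.drop_eq_getElem_cons hmlt
      have hget0 : PySem.List.pyGetD (l1 ++ weak.drop m) (m:Int) 0 = weak[m] := by
        rw [PySem.List.pyGetD_natCast, hdrop]
        simp [List.getD_eq_getElem?_getD, List.getElem?_append_right, hlen1, List.getElem?_eq_getElem hmlt]
      have hset1 : PySem.List.pySetD (l1 ++ weak.drop m) (m:Int) (weak[m] - start)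
          = l1 ++ (weak[m] - start) :: weak.drop (m+1) := by
        rw [PySem.List.pySetD_natCast, hdrop, List.set_append, hlen1]
        rw [if_neg (lt_irrefl m)]
        simp only [Nat.sub_self, List.set_cons_zero]
      have hget1 : PySem.List.pyGetD (l1 ++ (weak[m] - start) :: weak.drop (m+1)) (m:Int) 0
          = weak[m] - start := by
        rw [PySem.List.pyGetD_natCast]
        simp [List.getD_eq_getElem?_getD, hlen1]
      have hset2 : ∀ v : Int, PySem.List.pySetD (l1 ++ (weak[m] - start) :: weak.drop (m+1)) (m:Int) v
          = l1 ++ v :: weak.drop (m+1) := by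
        intro v
        rw [PySem.List.pySetD_natCast, List.set_append, hlen1]
        simp
      have htake : (weak.take (m+1)).map f = l1 ++ [f weak[m]] := by
        rw [List.take_add_one, List.map_append, ← hl1]
        simp [List.getElem?_eq_getElem hmlt]
      simp only [hget0, hset1, hget1, hset2]
      by_cases hc : weak[m] - start < 0
      · rw [if_pos hc, htake]
        simp [hf, show ¬ start ≤ weak[m] by omega]
      · rw [if_neg hc, htake]
        simp [hf, show start ≤ weak[m] by omega]

-- L4: port B's partition fold splits the sorted list into the two shifted runs
theorem pvL4 (start n : Int) (s : List Int) : ∀ (a b : List Int),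
    s.foldl (fun (p : List Int × List Int) w =>
        if w < start then (p.1 ++ [w - start + n], p.2) else (p.1, p.2 ++ [w - start])) (a, b)
    = (a ++ (s.filter (fun w => decide (w < start))).map (fun w => w - start + n),
       b ++ (s.filter (fun w => !decide (w < start))).map (fun w => w - start)) := by
  induction s with
  | nil => simp
  | cons w t ih =>
      intro a b
      by_cases h : w < start <;> simp [h, ih]

-- L5: the two-pointer merge loop is List.merge with an output accumulator
theorem pvL5 : ∀ (out lo hi : List Int),
    pvMergeLoop out lo hi = out ++ List.merge lo hi (fun a b => decide (a ≤ b)) := by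
  intro out lo hi
  fun_induction pvMergeLoop out lo hi with
  | case1 out a lo' b hi' h ih => simp_all
  | case2 out a lo' b hi' h ih => simp_all
  | case3 out lo hi h =>
      cases lo with
      | nil => simp
      | cons a lo' =>
          cases hi with
          | nil => simp
          | cons b hi' => exact (h a lo' b hi' rfl rfl).elim

-- ===== VERDICT (by name: the statement is the Claim_ definition above) =====
theorem makeNewWeak_spec : Claim_equal_makeNewWeak := by
  intro n weak _ hpre
  unfold Spec_makeNewWeak
  obtain ⟨j, hk⟩ : ∃ j : Nat, weak.length = j + 1 := by
    cases weak with
    | nil => exact absurd rfl hpre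
    | cons a t => exact ⟨t.length, by simp⟩
  have hcast : ((weak.length : Int)) = 1 + (j:Int) := by rw [hk]; push_cast; ring
  simp only [makeNewWeak, makeNewWeak_alt, hcast]
  rw [pvL1 weak (PySem.List.pyGetD weak 0 0 + n - PySem.List.pyGetD weak (-1) 0) weak.length j
    (by omega)]
  have hrep : List.replicate (weak.length - 1 - j) (0:Int) = [] := by rw [hk]; simp
  rw [hrep, List.append_nil]
  obtain ⟨h1, h2, h3⟩ := pvL2
    (fun i => PySem.List.pyGetD weak i 0 - PySem.List.pyGetD weak (i-1) 0)
    (PySem.List.pyGetD weak 0 0 + n - PySem.List.pyGetD weak (-1) 0) j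
  rw [PySem.List.max?_id_cons, Option.getD_some, ← h2, h3, Option.getD_some,
    Int.toNat_of_nonneg h1]
  set start := PySem.List.pyGetD weak
    (List.foldl (fun (s : Int × Int) i =>
        if PySem.List.pyGetD weak i 0 - PySem.List.pyGetD weak (i-1) 0 > s.2 then
          (i, PySem.List.pyGetD weak i 0 - PySem.List.pyGetD weak (i-1) 0)
        else s)
      ((0:Int), PySem.List.pyGetD weak 0 0 + n - PySem.List.pyGetD weak (-1) 0)
      (PySem.List.pyRange 1 (1 + (j:Int)))).1 0 with hstart
  rw [show (1 + (j:Int)) = ((j+1:Nat):Int) by push_cast; ring]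
  rw [pvL3 weak start n (j+1) (by omega)]
  rw [List.take_of_length_le (by omega), List.drop_eq_nil_of_le (by omega), List.append_nil]
  have hfun : (fun w => if w - start < 0 then w - start + n else w - start)
      = (fun w => if w < start then w - start + n else w - start) := by
    funext w
    split_ifs <;> omega
  rw [hfun]
  -- phase 2: B = sort input, split at start, merge; A = sort the shifted list
  set f : Int → Int := fun w => if w < start then w - start + n else w - start with hfd
  set s := PySem.List.sorted weak (fun x => x) with hs
  rw [pvL4, pvL5]
  set lo := (s.filter (fun w => decide (w < start))).map (fun w => w - start + n) with hlo
  set hi := (s.filter (fun w => !decide (w < start))).map (fun w => w - start) with hhi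
  simp only [List.nil_append]
  refine PySem.List.sorted_id_eq_of_perm_of_pairwise _ _ ?_ ?_
  · -- merge lo hi is a permutation of weak.map f
    refine (List.merge_perm_append _).trans ?_
    have hloeq : lo = (s.filter (fun w => decide (w < start))).map f := by
      rw [hlo]
      refine List.map_congr_left ?_
      intro w hw
      have := List.of_mem_filter hw
      simp only [decide_eq_true_eq] at this
      simp [hfd, this]
    have hhieq : hi = (s.filter (fun w => !decide (w < start))).map f := by
      rw [hhi]
      refine List.map_congr_left ?_
      intro w hw
      have := List.of_mem_filter hw
      simp only [Bool.not_eq_true', decide_eq_false_iff_not] at this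
      simp [hfd, this]
    rw [hloeq, hhieq, ← List.map_append]
    have hsperm : s.Perm weak := by rw [hs]; exact PySem.List.sorted_perm weak (fun x => x) false
    exact ((List.filter_append_perm _ s).map f).trans (hsperm.map f)
  · -- merge lo hi is sorted
    have hsp : s.Pairwise (· ≤ ·) := by rw [hs]; exact PySem.List.sorted_pairwise weak (fun x => x)
    have hlop : lo.Pairwise (· ≤ ·) := by
      rw [hlo, List.pairwise_map]
      exact (hsp.filter _).imp (by intro a b h; omega)
    have hhip : hi.Pairwise (· ≤ ·) := by
      rw [hhi, List.pairwise_map]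
      exact (hsp.filter _).imp (by intro a b h; omega)
    have := List.pairwise_merge (le := fun a b : Int => decide (a ≤ b))
      (by intro a b c hab hbc; simp at *; omega)
      (by intro a b; simp; omega)
      lo hi
      (hlop.imp (by intro a b h; simpa using h))
      (hhip.imp (by intro a b h; simpa using h))
    exact this.imp (by intro a b h; simpa using h)
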